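-- pv_equiv track=rewrite | github.com/elevate-foundry/gods-as-centroids | sim/lattice_consensus.py | hamming_mean
-- ===== SOURCE A (Python) =====
-- def cells_to_bits(cells):
--     return [b for c in cells for b in c]
--
-- def bits_to_cells(bits):
--     return [bits[i:i + 8] for i in range(0, len(bits), 8)]
--
-- def hamming_mean(all_cells, weights=None):
--     """Majority-vote centroid across multiple lattice points."""
--     n = len(all_cells)
--     if n == 0:
--         return [[False] * 8 for _ in range(12)]
--     all_bits = [cells_to_bits(c) for c in all_cells]
--     n_bits = len(all_bits[0])
--     result = []
--     for i in range(n_bits):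
--         if weights is None:
--             ones = sum(1 for bs in all_bits if bs[i])
--             result.append(ones > n / 2)
--         else:
--             w_ones = sum(w for bs, w in zip(all_bits, weights) if bs[i])
--             w_total = sum(weights)
--             result.append(w_ones > w_total / 2)
--     return bits_to_cells(result)
-- ===== SOURCE B (Python) =====
-- def hamming_mean(all_cells, weights=None):
--     """Majority-vote centroid: one tally pass over cells, then one thresholding pass."""
--     if not all_cells:
--         return [[False] * 8 for _ in range(12)]
--     all_bits = [[b for c in cells for b in c] for cells in all_cells]
--     n_bits = len(all_bits[0])
--     counts = [0] * n_bits
--     if weights is None: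
--         total = len(all_cells)
--         for bs in all_bits:
--             counts = [c + (1 if b else 0) for c, b in zip(counts, bs)]
--     else:
--         total = sum(weights)
--         for bs, w in zip(all_bits, weights):
--             counts = [c + (w if b else 0) for c, b in zip(counts, bs)]
--     bits = [2 * c > total for c in counts]
--     return [bits[i:i + 8] for i in range(0, len(bits), 8)]
-- ===== Notes on version B (the rewrite author's own statement) =====
-- stated objective: alternative
-- what changed: Replaces A's per-bit column scans (one pass over all cells for every bit index, recomputing sum(weights) each time) by a single tally pass over the cells accumulating a counts vector, followed by one thresholding pass.
-- outside the precondition, e.g. on hamming_mean([[[True, True]], [[False]]], None): A raises IndexError, B returns [[False]]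
import Mathlib
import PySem

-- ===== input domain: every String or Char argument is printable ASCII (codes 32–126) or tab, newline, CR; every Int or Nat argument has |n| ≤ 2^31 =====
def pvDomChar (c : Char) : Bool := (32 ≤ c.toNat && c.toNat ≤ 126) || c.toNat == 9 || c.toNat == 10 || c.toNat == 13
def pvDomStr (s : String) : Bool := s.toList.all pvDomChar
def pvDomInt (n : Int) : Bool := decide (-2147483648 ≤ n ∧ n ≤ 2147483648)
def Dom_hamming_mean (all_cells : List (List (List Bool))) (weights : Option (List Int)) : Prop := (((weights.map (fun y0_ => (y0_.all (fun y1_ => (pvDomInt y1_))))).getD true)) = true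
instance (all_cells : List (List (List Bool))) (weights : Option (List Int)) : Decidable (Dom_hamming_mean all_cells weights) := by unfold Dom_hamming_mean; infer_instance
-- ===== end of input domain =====

-- B replaces A's per-bit column scans by one tally pass over the cells plus one
-- thresholding pass (objective: alternative decomposition; the integer test 2*c > total
-- is exact for A's float test c > total/2 on the stated |int| ≤ 2^31 domain).

-- ===== PORT A =====
def cells_to_bits (cells : List (List Bool)) : List Bool :=
  cells.flatMap id   -- [b for c in cells for b in c]

def bits_to_cells (bits : List Bool) : List (List Bool) :=
  (PySem.List.pyRange 0 (bits.length : Int) 8).map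
    (fun i => PySem.List.slice bits (some i) (some (i + 8)))

def hamming_mean (all_cells : List (List (List Bool))) (weights : Option (List Int)) : List (List Bool) :=
  let n := all_cells.length
  if n = 0 then
    (List.range 12).map (fun _ => List.replicate 8 false)
  else
    let all_bits := all_cells.map cells_to_bits
    let n_bits := (all_bits.headI).length   -- all_bits[0]; nonempty here since n ≠ 0
    let result := (PySem.List.pyRange 0 (n_bits : Int) 1).foldl (fun result i =>
      match weights with
      | none =>
          -- ones = sum(1 for bs in all_bits if bs[i]); bs[i] total via pyGetD, exact under Pre_
          let ones : Int := (all_bits.map (fun bs => if PySem.List.pyGetD bs i false then (1 : Int) else 0)).sum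
          result ++ [decide (2 * ones > (n : Int))]   -- ones > n/2, exact integer form
      | some ws =>
          let w_ones : Int := ((all_bits.zip ws).map (fun p => if PySem.List.pyGetD p.1 i false then p.2 else 0)).sum
          let w_total : Int := ws.sum
          result ++ [decide (2 * w_ones > w_total)]) []   -- w_ones > w_total/2, exact integer form
    bits_to_cells result

-- ===== PORT B =====
def flat_bits (cells : List (List Bool)) : List Bool :=
  cells.flatMap id

def hamming_mean_alt (all_cells : List (List (List Bool))) (weights : Option (List Int)) : List (List Bool) :=
  if all_cells.length = 0 then
    (List.range 12).map (fun _ => List.replicate 8 false)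
  else
    let all_bits := all_cells.map flat_bits
    let n_bits := (all_bits.headI).length
    let tc : Int × List Int :=
      match weights with
      | none =>
          ((all_cells.length : Int),
           all_bits.foldl
             (fun counts bs => List.zipWith (fun c b => c + if b then (1 : Int) else 0) counts bs)
             (List.replicate n_bits (0 : Int)))
      | some ws =>
          (ws.sum,
           (all_bits.zip ws).foldl
             (fun counts p => List.zipWith (fun c b => c + if b then p.2 else 0) counts p.1)
             (List.replicate n_bits (0 : Int)))
    let bits := tc.2.map (fun c => decide (2 * c > tc.1))
    (PySem.List.pyRange 0 (bits.length : Int) 8).map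
      (fun i => PySem.List.slice bits (some i) (some (i + 8)))

-- ===== PRECONDITION & SPEC =====
-- Pre_ excludes exactly the inputs where A raises IndexError: some cell whose flattened
-- bit vector is actually indexed (every cell when unweighted, the first len(weights)
-- cells when weighted, by zip truncation) is shorter than the first cell's.
def Pre_hamming_mean (all_cells : List (List (List Bool))) (weights : Option (List Int)) : Prop :=
  ∀ c ∈ weights.elim all_cells (fun ws => all_cells.take ws.length),
    ((all_cells.headI).map List.length).sum ≤ (c.map List.length).sum
instance (all_cells : List (List (List Bool))) (weights : Option (List Int)) : Decidable (Pre_hamming_mean all_cells weights) := by unfold Pre_hamming_mean; infer_instance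

def pvWitness_hamming_mean : List (List (List Bool)) × Option (List Int) :=
  ([[[true, false], [true]], [[false], [true, true]]], some [2, -1])

def Spec_hamming_mean (all_cells : List (List (List Bool))) (weights : Option (List Int)) (out : List (List Bool)) : Prop := out = hamming_mean_alt all_cells weights
instance (all_cells : List (List (List Bool))) (weights : Option (List Int)) (out : List (List Bool)) : Decidable (Spec_hamming_mean all_cells weights out) := by unfold Spec_hamming_mean; infer_instance

-- ===== CLAIM (what is proved, stated in full; the proofs are below) =====
def Claim_equal_hamming_mean : Prop := ∀ (all_cells : List (List (List Bool))) (weights : Option (List Int)), Dom_hamming_mean all_cells weights → Pre_hamming_mean all_cells weights → Spec_hamming_mean all_cells weights (hamming_mean all_cells weights)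

-- ===== LEMMAS AND PROOFS =====

theorem length_cells_to_bits (c : List (List Bool)) :
    (cells_to_bits c).length = (c.map List.length).sum := by
  simp [cells_to_bits]

-- length of the tally fold (B's accumulation loop)
theorem tallyW_length (L : List (List Bool × Int)) (init : List Int)
    (h : ∀ p ∈ L, init.length ≤ p.1.length) :
    (L.foldl (fun counts p => List.zipWith (fun c b => c + if b then p.2 else 0) counts p.1) init).length
      = init.length := by
  induction L generalizing init with
  | nil => rfl
  | cons p L ih =>
      have hp := h p (List.mem_cons_self ..)
      have hlen : (List.zipWith (fun c b => c + if b then p.2 else 0) init p.1).length = init.length := by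
        simp [List.length_zipWith]; omega
      rw [List.foldl_cons, ih _ (by intro q hq; rw [hlen]; exact h q (List.mem_cons_of_mem _ hq)), hlen]

-- elementwise value of the tally fold: entry j accumulates the weighted column sum at j
theorem tallyW_getD (L : List (List Bool × Int)) (init : List Int) (j : Nat)
    (h : ∀ p ∈ L, init.length ≤ p.1.length) (hj : j < init.length) :
    (L.foldl (fun counts p => List.zipWith (fun c b => c + if b then p.2 else 0) counts p.1) init).getD j 0
      = init.getD j 0 + (L.map (fun p => if p.1.getD j false then p.2 else 0)).sum := by
  induction L generalizing init with
  | nil => simp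
  | cons p L ih =>
      have hp := h p (List.mem_cons_self ..)
      have hlen : (List.zipWith (fun c b => c + if b then p.2 else 0) init p.1).length = init.length := by
        simp [List.length_zipWith]; omega
      rw [List.foldl_cons,
        ih _ (by intro q hq; rw [hlen]; exact h q (List.mem_cons_of_mem _ hq)) (by omega)]
      have hj2 : j < p.1.length := lt_of_lt_of_le hj hp
      rw [List.getD_eq_getElem _ _ (by omega), List.getElem_zipWith, List.getD_eq_getElem _ _ hj]
      simp only [List.map_cons, List.sum_cons, List.getD_eq_getElem _ _ hj2]
      ring

-- A's per-bit appended results coincide with B's thresholded tally vector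
theorem core (L : List (List Bool × Int)) (nb : Nat) (tot : Int)
    (h : ∀ p ∈ L, nb ≤ p.1.length) :
    (PySem.List.pyRange 0 (nb : Int) 1).foldl
        (fun res i => res ++ [decide (2 * ((L.map (fun p => if PySem.List.pyGetD p.1 i false then p.2 else 0)).sum) > tot)]) []
      = (L.foldl (fun counts p => List.zipWith (fun c b => c + if b then p.2 else 0) counts p.1)
          (List.replicate nb (0 : Int))).map (fun c => decide (2 * c > tot)) := by
  rw [PySem.List.foldl_append_singleton_eq_map
    (f := fun i => decide (2 * ((L.map (fun p => if PySem.List.pyGetD p.1 i false then p.2 else 0)).sum) > tot))]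
  have hinit : ∀ p ∈ L, (List.replicate nb (0 : Int)).length ≤ p.1.length := by
    intro p hp; simpa using h p hp
  apply List.ext_getElem
  · simp [PySem.List.pyRange_zero_natCast, tallyW_length L _ hinit]
  · intro j h1 h2
    have hjnb : j < nb := by
      simpa [PySem.List.pyRange_zero_natCast] using h1
    simp only [List.nil_append, PySem.List.pyRange_zero_natCast, List.getElem_map, List.getElem_range]
    rw [← List.getD_eq_getElem _ 0, tallyW_getD L _ j hinit (by simpa using hjnb)]
    simp [PySem.List.pyGetD_natCast]

-- the unweighted tally is the weighted one over a constant-1 pairing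
theorem tally1_eq_tallyW (L : List (List Bool)) (init : List Int) :
    L.foldl (fun counts bs => List.zipWith (fun c b => c + if b then (1 : Int) else 0) counts bs) init
      = (L.map (fun bs => (bs, (1 : Int)))).foldl
          (fun counts p => List.zipWith (fun c b => c + if b then p.2 else 0) counts p.1) init := by
  induction L generalizing init with
  | nil => rfl
  | cons bs L ih => simp [List.foldl_cons, ih]

-- unweighted instance of `core`
theorem core1 (L : List (List Bool)) (nb : Nat) (tot : Int)
    (h : ∀ bs ∈ L, nb ≤ bs.length) :
    (PySem.List.pyRange 0 (nb : Int) 1).foldl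
        (fun res i => res ++ [decide (2 * ((L.map (fun bs => if PySem.List.pyGetD bs i false then (1 : Int) else 0)).sum) > tot)]) []
      = (L.foldl (fun counts bs => List.zipWith (fun c b => c + if b then (1 : Int) else 0) counts bs)
          (List.replicate nb (0 : Int))).map (fun c => decide (2 * c > tot)) := by
  rw [tally1_eq_tallyW]
  have hc := core (L.map (fun bs => (bs, (1 : Int)))) nb tot
    (by intro p hp; rcases List.mem_map.mp hp with ⟨bs, hbs, rfl⟩; exact h bs hbs)
  simpa [List.map_map, Function.comp] using hc

-- a member of zip l1 l2 has its first component in l1.take l2.length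
theorem fst_mem_take_of_mem_zip {α β : Type} {p : α × β} :
    ∀ {l1 : List α} {l2 : List β}, p ∈ l1.zip l2 → p.1 ∈ l1.take l2.length := by
  intro l1
  induction l1 with
  | nil => intro l2 h; simp [List.zip] at h
  | cons a l1 ih =>
      intro l2 h
      cases l2 with
      | nil => simp [List.zip] at h
      | cons b l2 =>
          rcases List.mem_cons.mp h with h1 | h2
          · subst h1; simp
          · simpa using Or.inr (ih h2)

-- ===== VERDICT (by name: the statement is the Claim_ definition above) =====
theorem hamming_mean_spec : Claim_equal_hamming_mean := by
  intro all_cells weights _hdom hpre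
  unfold Spec_hamming_mean
  cases all_cells with
  | nil => cases weights <;> rfl
  | cons a rest =>
      simp only [hamming_mean, hamming_mean_alt]
      rw [if_neg (by simp : ¬((a :: rest).length = 0)), if_neg (by simp : ¬((a :: rest).length = 0))]
      cases weights with
      | none =>
          dsimp only
          simp only [show flat_bits = cells_to_bits from rfl]
          have hpre' : ∀ bs ∈ (a :: rest).map cells_to_bits,
              ((a :: rest).map cells_to_bits).headI.length ≤ bs.length := by
            intro bs hbs
            rcases List.mem_map.mp hbs with ⟨c, hc, rfl⟩
            show (cells_to_bits a).length ≤ _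
            rw [length_cells_to_bits, length_cells_to_bits]
            simpa [Pre_hamming_mean] using hpre c hc
          exact congrArg bits_to_cells
            (core1 ((a :: rest).map cells_to_bits) ((a :: rest).map cells_to_bits).headI.length
              (((a :: rest).length : Nat) : Int) hpre')
      | some ws =>
          dsimp only
          simp only [show flat_bits = cells_to_bits from rfl]
          have hpre' : ∀ p ∈ ((a :: rest).map cells_to_bits).zip ws,
              ((a :: rest).map cells_to_bits).headI.length ≤ p.1.length := by
            intro p hp
            have hmem := fst_mem_take_of_mem_zip hp
            rw [← List.map_take] at hmem
            rcases List.mem_map.mp hmem with ⟨c, hc, hce⟩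
            show (cells_to_bits a).length ≤ _
            rw [← hce, length_cells_to_bits, length_cells_to_bits]
            simpa [Pre_hamming_mean] using hpre c hc
          exact congrArg bits_to_cells
            (core (((a :: rest).map cells_to_bits).zip ws) ((a :: rest).map cells_to_bits).headI.length
              ws.sum hpre')
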